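-- pv_equiv track=rewrite | github.com/AMP-SCZ/form_qc_trackers | main/utils/utils.py | collect_digit
-- ===== SOURCE A (Python) =====
-- def collect_digit(string):
--     """Collects digit in current string
--
--     Parameters
--     ------------
--     string: string containing digit
--     """
--     number_str = ''
--     for char in string:
--         if char.isdigit():
--             number_str += char
--         elif number_str != '':
--             return number_str
--     return number_str
-- ===== SOURCE B (Python) =====
-- from itertools import groupby
--
-- def collect_digit(string):
--     """Collects digit in current string
--
--     Parameters
--     ------------
--     string: string containing digit
--     """
--     for is_digit, group in groupby(string, key=str.isdigit):
--         if is_digit: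
--             return ''.join(group)
--     return ''
-- ===== Notes on version B (the rewrite author's own statement) =====
-- stated objective: idiomatic
-- what changed: Replaced the character-level flag loop with its nonempty-accumulator sentinel by a run decomposition: itertools.groupby splits the string into maximal digit/non-digit runs and B returns the first digit run.
import Mathlib
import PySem

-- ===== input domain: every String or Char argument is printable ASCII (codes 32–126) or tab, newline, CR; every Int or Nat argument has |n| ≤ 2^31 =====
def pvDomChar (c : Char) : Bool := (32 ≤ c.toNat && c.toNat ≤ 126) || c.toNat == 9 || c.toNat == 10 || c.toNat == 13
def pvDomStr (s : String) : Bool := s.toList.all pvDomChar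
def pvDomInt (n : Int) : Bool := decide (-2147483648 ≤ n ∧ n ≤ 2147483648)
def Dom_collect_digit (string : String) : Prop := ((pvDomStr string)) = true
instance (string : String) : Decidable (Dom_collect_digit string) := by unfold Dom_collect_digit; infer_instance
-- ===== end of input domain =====

-- B replaces A's flag-driven character loop (nonempty-accumulator sentinel) by a run decomposition: groupby splits the string into maximal digit/non-digit runs and the first digit run is returned (idiomatic; same O(n) cost).


-- ===== PORT A =====
-- the for-loop with early return, as structural recursion over the chars with the accumulator number_str
def collectDigitLoopA : List Char → List Char → List Char
  | [], acc => acc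
  | c :: cs, acc =>
    if PySem.Chars.isdigit c then collectDigitLoopA cs (acc ++ [c])
    else if acc ≠ [] then acc
    else collectDigitLoopA cs acc

def collect_digit (string : String) : String :=
  String.ofList (collectDigitLoopA string.toList [])

-- ===== PORT B =====
-- hand port of itertools.groupby(string, key=str.isdigit): the list of maximal runs of
-- equal key, each tagged with its key (exact: groupby yields (key, iterator-of-run) pairs
-- for maximal runs of consecutive equal keys)
def pyGroupByDigit : List Char → List (Bool × List Char)
  | [] => []
  | c :: cs =>
    let k := PySem.Chars.isdigit c
    (k, c :: cs.takeWhile (fun x => PySem.Chars.isdigit x == k)) ::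
      pyGroupByDigit (cs.dropWhile (fun x => PySem.Chars.isdigit x == k))
termination_by l => l.length
decreasing_by
  simpa using Nat.lt_succ_of_le (List.length_dropWhile_le _ _)

-- the for-loop over the groups: return the first group whose key is True, else ''
def firstDigitRun : List (Bool × List Char) → List Char
  | [] => []
  | (k, g) :: rest => if k then g else firstDigitRun rest

def collect_digit_alt (string : String) : String :=
  String.ofList (firstDigitRun (pyGroupByDigit string.toList))

-- ===== PRECONDITION & SPEC =====
def Spec_collect_digit (string : String) (out : String) : Prop := out = collect_digit_alt string
instance (string : String) (out : String) : Decidable (Spec_collect_digit string out) := by unfold Spec_collect_digit; infer_instance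

-- ===== CLAIM (what is proved, stated in full; the proofs are below) =====
def Claim_equal_collect_digit : Prop := ∀ (string : String), Dom_collect_digit string → Spec_collect_digit string (collect_digit string)

-- ===== LEMMAS AND PROOFS =====
-- A's loop once the accumulator is nonempty: it just extends by the next digit run
theorem collectDigitLoopA_ne_nil (cs : List Char) (acc : List Char) (h : acc ≠ []) :
    collectDigitLoopA cs acc = acc ++ cs.takeWhile PySem.Chars.isdigit := by
  induction cs generalizing acc with
  | nil => simp [collectDigitLoopA]
  | cons c cs ih =>
    by_cases hd : PySem.Chars.isdigit c
    · simp [collectDigitLoopA, hd, ih (acc ++ [c]) (by simp)]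
    · simp [collectDigitLoopA, hd, h, List.takeWhile]

-- A's loop with empty accumulator = first digit run after the non-digit prefix
theorem collectDigitLoopA_nil_acc (cs : List Char) :
    collectDigitLoopA cs [] =
      (cs.dropWhile (fun c => !PySem.Chars.isdigit c)).takeWhile PySem.Chars.isdigit := by
  induction cs with
  | nil => simp [collectDigitLoopA]
  | cons c cs ih =>
    by_cases hd : PySem.Chars.isdigit c
    · simp [collectDigitLoopA, hd, List.dropWhile,
        collectDigitLoopA_ne_nil cs [c] (by simp)]
    · simp [collectDigitLoopA, hd, List.dropWhile, ih]

-- B's group scan = first digit run after the non-digit prefix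
theorem firstDigitRun_pyGroupByDigit (l : List Char) :
    firstDigitRun (pyGroupByDigit l) =
      (l.dropWhile (fun c => !PySem.Chars.isdigit c)).takeWhile PySem.Chars.isdigit := by
  induction l using pyGroupByDigit.induct with
  | case1 => simp [pyGroupByDigit, firstDigitRun]
  | case2 c cs k ih =>
    rw [show k = PySem.Chars.isdigit c from rfl] at ih
    by_cases hd : PySem.Chars.isdigit c
    · simp [pyGroupByDigit, firstDigitRun, hd, List.dropWhile]
    · have hf : PySem.Chars.isdigit c = false := by simpa using hd
      rw [hf] at ih
      rw [pyGroupByDigit]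
      simp only [hf, firstDigitRun, Bool.false_eq_true, if_false]
      have hrw : (cs.dropWhile (fun x => PySem.Chars.isdigit x == false)) =
          cs.dropWhile (fun c => !PySem.Chars.isdigit c) := by simp
      rw [hrw] at ih ⊢
      rw [ih]
      have hfix : ((cs.dropWhile (fun c => !PySem.Chars.isdigit c)).dropWhile
          (fun c => !PySem.Chars.isdigit c)) = cs.dropWhile (fun c => !PySem.Chars.isdigit c) := by
        cases h : cs.dropWhile (fun c => !PySem.Chars.isdigit c) with
        | nil => simp
        | cons d ds =>
          have := List.head_dropWhile_not (p := fun c => !PySem.Chars.isdigit c) (l := cs)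
            (by simp [h])
          simp [h] at this ⊢
          simp [this]
      rw [hfix]
      simp [List.dropWhile, hf]

-- ===== VERDICT (by name: the statement is the Claim_ definition above) =====
theorem collect_digit_spec : Claim_equal_collect_digit := by
  intro s _
  unfold Spec_collect_digit collect_digit collect_digit_alt
  rw [collectDigitLoopA_nil_acc, firstDigitRun_pyGroupByDigit]
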